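-- pv_equiv track=rewrite | github.com/MiHHuynh/itp-w1-create-box | create_box/main.py | create_border_box
-- ===== SOURCE A (Python) =====
-- def create_border_box(height, width, character):
--     box = ''
--     n = 0
--     space = ' ' * (width-2)
--     for n in range(height):
--         if n == 0 or n == (height-1):
--             for n in range(width):
--                 box += character
--             box += '\n'
--         else:
--             box += (character + space + character)
--             box += '\n'
--     return box
-- ===== SOURCE B (Python) =====
-- def create_border_box(height, width, character):
--     if height <= 0:
--         return ''
--     top = character * width + '\n'
--     if height == 1:
--         return top
--     mid = character + ' ' * (width - 2) + character + '\n'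
--     return top + mid * (height - 2) + top
-- ===== Notes on version B (the rewrite author's own statement) =====
-- stated objective: simpler
-- what changed: Replaces the per-row loop (with its inner per-character loop and first/last-row branch) by a case split on height that builds the top and middle lines once and repeats the middle line with string multiplication.
import Mathlib
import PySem

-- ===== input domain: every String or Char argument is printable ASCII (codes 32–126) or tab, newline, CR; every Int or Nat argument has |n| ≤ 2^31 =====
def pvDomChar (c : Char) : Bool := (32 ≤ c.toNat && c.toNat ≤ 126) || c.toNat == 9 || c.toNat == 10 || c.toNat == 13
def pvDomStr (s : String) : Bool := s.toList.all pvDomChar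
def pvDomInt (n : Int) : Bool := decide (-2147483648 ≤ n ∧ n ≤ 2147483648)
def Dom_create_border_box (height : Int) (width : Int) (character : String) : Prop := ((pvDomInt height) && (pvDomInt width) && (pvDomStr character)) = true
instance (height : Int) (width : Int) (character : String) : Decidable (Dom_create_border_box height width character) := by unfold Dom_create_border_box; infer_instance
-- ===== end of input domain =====

-- B replaces A's per-row loop (inner per-character loop + first/last-row branch) by a case
-- split on height with the top and middle lines each built once; objective: simpler.

-- ===== PORT A =====
-- literal transliteration: box accumulated character by character over range(height)/range(width)
def create_border_box (height : Int) (width : Int) (character : String) : String :=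
  let space : List Char := PySem.List.pyRepeat [' '] (width - 2)   -- ' ' * (width-2)
  String.ofList ((PySem.List.pyRange 0 height 1).foldl (fun box n =>
      if n = 0 ∨ n = height - 1 then
        ((PySem.List.pyRange 0 width 1).foldl (fun b _ => b ++ character.toList) box) ++ ['\n']
      else
        (box ++ (character.toList ++ space ++ character.toList)) ++ ['\n'])
    ([] : List Char))

-- ===== PORT B =====
def create_border_box_alt (height : Int) (width : Int) (character : String) : String :=
  if height ≤ 0 then ""
  else
    let top : List Char := PySem.List.pyRepeat character.toList width ++ ['\n']
    if height = 1 then String.ofList top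
    else
      let mid : List Char :=
        character.toList ++ PySem.List.pyRepeat [' '] (width - 2) ++ character.toList ++ ['\n']
      String.ofList (top ++ PySem.List.pyRepeat mid (height - 2) ++ top)

-- ===== PRECONDITION & SPEC =====
def Spec_create_border_box (height : Int) (width : Int) (character : String) (out : String) : Prop := out = create_border_box_alt height width character
instance (height : Int) (width : Int) (character : String) (out : String) : Decidable (Spec_create_border_box height width character out) := by unfold Spec_create_border_box; infer_instance

-- ===== CLAIM (what is proved, stated in full; the proofs are below) =====
def Claim_equal_create_border_box : Prop := ∀ (height : Int) (width : Int) (character : String), Dom_create_border_box height width character → Spec_create_border_box height width character (create_border_box height width character)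

-- ===== LEMMAS AND PROOFS =====

-- the inner 'for n in range(width): box += character' loop appends character len(range) times
theorem pv_foldl_append_const {α β : Type} (cs : List α) (l : List β) :
    ∀ (box : List α), l.foldl (fun b _ => b ++ cs) box = box ++ (List.replicate l.length cs).flatten := by
  induction l with
  | nil => intro box; simp
  | cons x xs ih => intro box; simp [List.foldl_cons, ih, List.replicate_succ, List.append_assoc]

-- a flatMap whose value is constant on the list is a repeat
theorem pv_flatMap_const {α β : Type} (c : List β) (g : α → List β) (l : List α)
    (h : ∀ x ∈ l, g x = c) : l.flatMap g = (List.replicate l.length c).flatten := by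
  induction l with
  | nil => simp
  | cons x xs ih =>
      simp only [List.flatMap_cons, List.length_cons, List.replicate_succ, List.flatten_cons]
      rw [h x (List.mem_cons_self), ih (fun y hy => h y (List.mem_cons_of_mem _ hy))]

theorem pv_key (height width : Int) (character : String) :
    create_border_box height width character = create_border_box_alt height width character := by
  unfold create_border_box create_border_box_alt
  set cs := character.toList with hcs
  set top : List Char := PySem.List.pyRepeat cs width ++ ['\n'] with htop
  set mid : List Char := cs ++ PySem.List.pyRepeat [' '] (width - 2) ++ cs ++ ['\n'] with hmid
  have hbody : (PySem.List.pyRange 0 height 1).foldl (fun box n =>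
      if n = 0 ∨ n = height - 1 then
        ((PySem.List.pyRange 0 width 1).foldl (fun b _ => b ++ cs) box) ++ ['\n']
      else
        (box ++ (cs ++ PySem.List.pyRepeat [' '] (width - 2) ++ cs)) ++ ['\n']) ([] : List Char)
      = (PySem.List.pyRange 0 height 1).flatMap
          (fun n => if n = 0 ∨ n = height - 1 then top else mid) := by
    rw [PySem.List.foldl_congr_mem _ _
        (fun box n => box ++ (if n = 0 ∨ n = height - 1 then top else mid)) _ ?_]
    · rw [PySem.List.foldl_append_eq_flatMap]; simp
    · intro acc n _
      by_cases hn : n = 0 ∨ n = height - 1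
      · simp only [hn, if_pos]
        rw [pv_foldl_append_const cs _ acc, htop]
        have : (PySem.List.pyRange 0 width 1).length = width.toNat := by
          simp [PySem.List.length_pyRange_one]
        rw [this, PySem.List.pyRepeat]
        simp [List.append_assoc]
      · simp only [hn, if_false]
        rw [hmid]; simp [List.append_assoc]
  simp only [hbody]
  by_cases h0 : height ≤ 0
  · rw [PySem.List.pyRange_one_eq_nil h0, if_pos h0]
    rfl
  · rw [if_neg h0]
    by_cases h1 : height = 1
    · subst h1
      have : PySem.List.pyRange 0 1 1 = [0] := by decide
      rw [this, if_pos rfl]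
      simp
    · -- height ≥ 2
      have h2 : 2 ≤ height := by omega
      rw [if_neg h1]
      have hsplit : PySem.List.pyRange 0 height 1
          = PySem.List.pyRange 0 1 1 ++ (PySem.List.pyRange 1 (height - 1) 1
            ++ PySem.List.pyRange (height - 1) height 1) := by
        rw [← PySem.List.pyRange_one_append 1 (height - 1) height (by omega) (by omega),
            ← PySem.List.pyRange_one_append 0 1 height (by omega) (by omega)]
      have hfirst : PySem.List.pyRange 0 1 1 = [0] := by decide
      have hlast : PySem.List.pyRange (height - 1) height 1 = [height - 1] := by
        have := PySem.List.pyRange_one_singleton (height - 1)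
        simpa using this
      rw [hsplit, List.flatMap_append, List.flatMap_append, hfirst, hlast]
      have hmidpart : (PySem.List.pyRange 1 (height - 1) 1).flatMap
          (fun n => if n = 0 ∨ n = height - 1 then top else mid)
          = PySem.List.pyRepeat mid (height - 2) := by
        rw [pv_flatMap_const mid _ _ ?_]
        · rw [PySem.List.length_pyRange_one, PySem.List.pyRepeat,
              show height - 1 - 1 = height - 2 from by ring]
        · intro n hn
          rw [PySem.List.mem_pyRange_one] at hn
          rw [if_neg (by omega)]
      rw [hmidpart]
      simp [List.append_assoc]

-- ===== VERDICT (by name: the statement is the Claim_ definition above) =====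
theorem create_border_box_spec : Claim_equal_create_border_box := by
  intro height width character _
  unfold Spec_create_border_box
  exact pv_key height width character
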